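-- pv_equiv track=rewrite | github.com/loma18/pdf-tools | python-backend/pdf_bookmark_tool.py | find_most_relevant_sequence
-- ===== SOURCE A (Python) =====
-- from typing import List, Tuple, Dict, Optional
--
-- def find_most_relevant_sequence(current_numbers: List[int],
--                                previous_sequences: List[List[int]]) -> List[int]:
--     """
--     找到与当前序列最相关的前序序列进行比较
--
--     Args:
--         current_numbers: 当前数字序列
--         previous_sequences: 之前的数字序列列表
--
--     Returns:
--         List[int]: 最相关的前序序列，如果没有找到返回None
--     """
--     if not current_numbers or not previous_sequences:
--         return None
--
--     best_match = None
--     max_common_prefix = -1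
--     best_layer_diff = float('inf')
--
--     # 寻找具有最长公共前缀的同层级或相关层级序列
--     for prev_numbers in reversed(previous_sequences):  # 从最近的开始
--         if not prev_numbers:
--             continue
--
--         # 计算公共前缀长度
--         common_prefix_len = 0
--         min_len = min(len(current_numbers), len(prev_numbers))
--
--         for i in range(min_len):
--             if current_numbers[i] == prev_numbers[i]:
--                 common_prefix_len += 1
--             else:
--                 break
--
--         layer_diff = abs(len(current_numbers) - len(prev_numbers))
--
--         # 优先选择同层级且有公共前缀的序列
--         if len(current_numbers) == len(prev_numbers) and common_prefix_len >= len(current_numbers) - 1: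
--             return prev_numbers
--
--         # 对于深层级标题（5层及以上），更宽松的匹配条件
--         if len(current_numbers) >= 5:
--             # 如果公共前缀足够长（至少3级），则认为相关
--             if common_prefix_len >= 3 and common_prefix_len > max_common_prefix:
--                 max_common_prefix = common_prefix_len
--                 best_match = prev_numbers
--                 best_layer_diff = layer_diff
--             elif common_prefix_len == max_common_prefix and layer_diff < best_layer_diff:
--                 best_match = prev_numbers
--                 best_layer_diff = layer_diff
--         else:
--             # 对于浅层级标题，保持原有逻辑
--             if common_prefix_len > max_common_prefix:
--                 max_common_prefix = common_prefix_len
--                 best_match = prev_numbers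
--                 best_layer_diff = layer_diff
--             elif common_prefix_len == max_common_prefix and layer_diff < best_layer_diff:
--                 best_match = prev_numbers
--                 best_layer_diff = layer_diff
--
--     # 根据层级调整最小公共前缀要求
--     min_prefix_required = 2
--     if len(current_numbers) >= 5:
--         min_prefix_required = 4  # 深层级需要更多公共前缀才进行比较
--     elif len(current_numbers) >= 4:
--         min_prefix_required = 3  # 4层级需要至少3级公共前缀
--
--     if max_common_prefix >= min_prefix_required:
--         return best_match
--
--     return None
-- ===== SOURCE B (Python) =====
-- from typing import List, Optional
--
--
-- def _cpl(x: List[int], y: List[int]) -> int: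
--     """Common-prefix length: index of first mismatch in the zipped pair."""
--     return next((i for i, (a, b) in enumerate(zip(x, y)) if a != b),
--                 min(len(x), len(y)))
--
--
-- def find_most_relevant_sequence(current_numbers: List[int],
--                                 previous_sequences: List[List[int]]) -> Optional[List[int]]:
--     if not current_numbers or not previous_sequences:
--         return None
--     n = len(current_numbers)
--     rev = [p for p in reversed(previous_sequences) if p]
--     # Pass 1: most recent same-length sequence sharing all but possibly the last element.
--     for p in rev:
--         if len(p) == n and _cpl(current_numbers, p) >= n - 1:
--             return p
--     # Pass 2: collect candidates (deep headings must share a prefix of >= 3),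
--     # pick the first maximum by (prefix length, -length difference).
--     deep = n >= 5
--     cands = []
--     for p in rev:
--         c = _cpl(current_numbers, p)
--         if not deep or c >= 3:
--             cands.append((c, -abs(n - len(p)), p))
--     if not cands:
--         return None
--     best = max(cands, key=lambda t: (t[0], t[1]))
--     req = 4 if n >= 5 else (3 if n >= 4 else 2)
--     return best[2] if best[0] >= req else None
-- ===== Notes on version B (the rewrite author's own statement) =====
-- stated objective: alternative
-- what changed: Replaces A's single stateful reversed loop (early return interleaved with best-tracking over three mutable variables) by a two-pass decomposition: a find-first pass for the same-length near-identical match, then filter the competing candidates and take the first maximum by the key (prefix length, -length difference), thresholding at the end.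
import Mathlib
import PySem

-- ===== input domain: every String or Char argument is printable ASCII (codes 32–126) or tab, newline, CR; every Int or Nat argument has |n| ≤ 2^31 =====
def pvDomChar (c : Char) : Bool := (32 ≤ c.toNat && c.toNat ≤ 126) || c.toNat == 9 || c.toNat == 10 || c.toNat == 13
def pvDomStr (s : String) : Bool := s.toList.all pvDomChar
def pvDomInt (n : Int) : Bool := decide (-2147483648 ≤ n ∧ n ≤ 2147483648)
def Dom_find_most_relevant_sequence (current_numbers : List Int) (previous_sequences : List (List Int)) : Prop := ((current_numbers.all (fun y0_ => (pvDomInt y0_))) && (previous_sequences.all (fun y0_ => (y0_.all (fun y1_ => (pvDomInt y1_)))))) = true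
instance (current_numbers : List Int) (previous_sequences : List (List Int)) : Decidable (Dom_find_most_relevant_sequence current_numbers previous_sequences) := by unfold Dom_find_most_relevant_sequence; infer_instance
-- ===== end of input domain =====

-- B: two-pass decomposition (find-first early match, then filter candidates and take the
-- first maximum by key) instead of A's single stateful loop; same cost, proved equal return value.

-- ===== PORT A =====

-- A's inner prefix loop: for i in range(min_len): if cur[i]==prev[i]: +=1 else break —
-- same computation as pairwise structural recursion on both lists.
def commonPrefixLen : List Int → List Int → Int
  | a :: as_, b :: bs => if a = b then 1 + commonPrefixLen as_ bs else 0
  | _, _ => 0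

-- best_layer_diff starts at float('inf'); every later value is an Int, so the state is
-- Option Int with none = inf, and `x < best_layer_diff` is ltInf (exact on this domain).
def ltInf (x : Int) : Option Int → Bool
  | none => true
  | some d => decide (x < d)

def findA_go (cur : List Int) : List (List Int) → Option (List Int) → Int → Option Int → Option (List Int)
  | [], best, maxp, _ =>
      let req : Int := if cur.length ≥ 5 then 4 else if cur.length ≥ 4 then 3 else 2
      if maxp ≥ req then best else none
  | p :: rest, best, maxp, bdiff =>
      if p = [] then findA_go cur rest best maxp bdiff else
      let c := commonPrefixLen cur p
      let ld : Int := |(cur.length : Int) - (p.length : Int)|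
      if cur.length = p.length ∧ c ≥ (cur.length : Int) - 1 then some p
      else if cur.length ≥ 5 then
        (if c ≥ 3 ∧ c > maxp then findA_go cur rest (some p) c (some ld)
         else if c = maxp ∧ ltInf ld bdiff then findA_go cur rest (some p) maxp (some ld)
         else findA_go cur rest best maxp bdiff)
      else
        (if c > maxp then findA_go cur rest (some p) c (some ld)
         else if c = maxp ∧ ltInf ld bdiff then findA_go cur rest (some p) maxp (some ld)
         else findA_go cur rest best maxp bdiff)

def find_most_relevant_sequence (current_numbers : List Int) (previous_sequences : List (List Int)) : Option (List Int) :=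
  if current_numbers = [] ∨ previous_sequences = [] then none
  else findA_go current_numbers previous_sequences.reverse none (-1) none

-- ===== PORT B =====

-- Source B _cpl: index of first mismatch in the zipped pair, else min of the lengths.
def cplB (x y : List Int) : Int :=
  match (x.zip y).findIdx? (fun ab => ab.1 ≠ ab.2) with
  | some i => (i : Int)
  | none => ((min x.length y.length : Nat) : Int)

-- candidate = (prefix length, -abs length difference, sequence); key = first two components
def keyGt (s t : Int × Int × List Int) : Bool :=
  decide (s.1 > t.1 ∨ (s.1 = t.1 ∧ s.2.1 > t.2.1))

-- Python max(cands, key=...): first maximal element, as a fold keeping strictly greater.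
def maxByFirst (h : Int × Int × List Int) (tl : List (Int × Int × List Int)) : Int × Int × List Int :=
  tl.foldl (fun acc t => if keyGt t acc then t else acc) h

def candOf (cur : List Int) (deep : Bool) (p : List Int) : Option (Int × Int × List Int) :=
  let c := cplB cur p
  if ¬deep ∨ c ≥ 3 then some (c, -|(cur.length : Int) - (p.length : Int)|, p) else none

def earlyP (cur : List Int) (p : List Int) : Bool :=
  decide (p.length = cur.length ∧ cplB cur p ≥ (cur.length : Int) - 1)

def find_most_relevant_sequence_alt (current_numbers : List Int) (previous_sequences : List (List Int)) : Option (List Int) :=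
  if current_numbers = [] ∨ previous_sequences = [] then none else
  let rev := previous_sequences.reverse.filter (fun p => p ≠ [])
  match rev.find? (earlyP current_numbers) with
  | some p => some p
  | none =>
    let deep : Bool := decide (current_numbers.length ≥ 5)
    match rev.filterMap (candOf current_numbers deep) with
    | [] => none
    | h :: tl =>
      let best := maxByFirst h tl
      let req : Int := if current_numbers.length ≥ 5 then 4 else if current_numbers.length ≥ 4 then 3 else 2
      if best.1 ≥ req then some best.2.2 else none

-- ===== PRECONDITION & SPEC =====
def Spec_find_most_relevant_sequence (current_numbers : List Int) (previous_sequences : List (List Int)) (out : Option (List Int)) : Prop := out = find_most_relevant_sequence_alt current_numbers previous_sequences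
instance (current_numbers : List Int) (previous_sequences : List (List Int)) (out : Option (List Int)) : Decidable (Spec_find_most_relevant_sequence current_numbers previous_sequences out) := by unfold Spec_find_most_relevant_sequence; infer_instance

-- ===== CLAIM (what is proved, stated in full; the proofs are below) =====
def Claim_equal_find_most_relevant_sequence : Prop := ∀ (current_numbers : List Int) (previous_sequences : List (List Int)), Dom_find_most_relevant_sequence current_numbers previous_sequences → Spec_find_most_relevant_sequence current_numbers previous_sequences (find_most_relevant_sequence current_numbers previous_sequences)

-- ===== LEMMAS AND PROOFS =====

theorem cplB_eq (x y : List Int) : cplB x y = commonPrefixLen x y := by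
  induction x generalizing y with
  | nil => cases y <;> simp [cplB, commonPrefixLen]
  | cons a as ih =>
    cases y with
    | nil => simp [cplB, commonPrefixLen]
    | cons b bs =>
      by_cases hab : a = b
      · simp only [cplB, List.zip_cons_cons, List.findIdx?_cons, hab]
        simp only [cplB] at ih
        cases hix : (as.zip bs).findIdx? (fun ab => ab.1 ≠ ab.2) with
        | some i =>
          have := ih bs; rw [hix] at this
          simp [commonPrefixLen, ← this]
          omega
        | none =>
          have := ih bs; rw [hix] at this
          simp [commonPrefixLen, ← this]
          omega
      · simp [cplB, commonPrefixLen, List.findIdx?_cons, hab]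

theorem cpl_nonneg (x y : List Int) : 0 ≤ commonPrefixLen x y := by
  induction x generalizing y with
  | nil => cases y <;> simp [commonPrefixLen]
  | cons a as ih =>
    cases y with
    | nil => simp [commonPrefixLen]
    | cons b bs =>
      simp only [commonPrefixLen]
      split
      · have := ih bs; omega
      · omega

-- abstract accumulator for A's (best_match, max_common_prefix, best_layer_diff) triple
def stOf : Option (Int × Int × List Int) → Option (List Int) × Int × Option Int
  | none => (none, -1, none)
  | some (c, nd, p) => (some p, c, some (-nd))

def foldOpt : Option (Int × Int × List Int) → List (Int × Int × List Int) → Option (Int × Int × List Int)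
  | acc, [] => acc
  | none, t :: ts => foldOpt (some t) ts
  | some a, t :: ts => foldOpt (some (if keyGt t a then t else a)) ts

def finalize (cur : List Int) : Option (Int × Int × List Int) → Option (List Int)
  | none => none
  | some (c, _, p) =>
      let req : Int := if cur.length ≥ 5 then 4 else if cur.length ≥ 4 then 3 else 2
      if c ≥ req then some p else none

theorem foldOpt_some (a : Int × Int × List Int) (ts : List (Int × Int × List Int)) :
    foldOpt (some a) ts = some (maxByFirst a ts) := by
  induction ts generalizing a with
  | nil => simp [foldOpt, maxByFirst]
  | cons t ts ih => simp [foldOpt, maxByFirst, ih, List.foldl_cons]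

theorem go_eq (cur : List Int) (l : List (List Int)) (acc : Option (Int × Int × List Int))
    (hacc : ∀ t, acc = some t → (0 ≤ t.1 ∧ (5 ≤ cur.length → 3 ≤ t.1))) :
    findA_go cur l (stOf acc).1 (stOf acc).2.1 (stOf acc).2.2 =
      match (l.filter (fun p => p ≠ [])).find? (earlyP cur) with
      | some p => some p
      | none => finalize cur (foldOpt acc ((l.filter (fun p => p ≠ [])).filterMap (candOf cur (decide (cur.length ≥ 5))))) := by
  induction l generalizing acc with
  | nil =>
    cases acc with
    | none => simp [findA_go, stOf, foldOpt, finalize]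
    | some t => obtain ⟨c, nd, p⟩ := t; simp [findA_go, stOf, foldOpt, finalize]
  | cons p rest ih =>
    by_cases hp : p = []
    · have hL : findA_go cur (p :: rest) (stOf acc).1 (stOf acc).2.1 (stOf acc).2.2
          = findA_go cur rest (stOf acc).1 (stOf acc).2.1 (stOf acc).2.2 := by
        simp [findA_go, hp]
      have hF : (p :: rest).filter (fun q => q ≠ []) = rest.filter (fun q => q ≠ []) := by
        simp [hp]
      rw [hL, hF]; exact ih acc hacc
    · have hF : (p :: rest).filter (fun q => q ≠ []) = p :: rest.filter (fun q => q ≠ []) := by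
        simp [hp]
      rw [hF]
      have hc0 : 0 ≤ commonPrefixLen cur p := cpl_nonneg cur p
      by_cases he : cur.length = p.length ∧ commonPrefixLen cur p ≥ (cur.length : Int) - 1
      · have hE : earlyP cur p = true := by
          simp only [earlyP, cplB_eq, decide_eq_true_iff]
          exact ⟨he.1.symm, he.2⟩
        rw [List.find?_cons_of_pos hE]
        simp only [findA_go, if_neg hp, if_pos he]
      · have hE : ¬ (earlyP cur p = true) := by
          simp only [earlyP, cplB_eq, decide_eq_true_iff]
          intro h; exact he ⟨h.1.symm, h.2⟩
        rw [List.find?_cons_of_neg hE, List.filterMap_cons]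
        by_cases hdrop : (cur.length ≥ 5) ∧ commonPrefixLen cur p < 3
        · have hcand : candOf cur (decide (cur.length ≥ 5)) p = none := by
            simp only [candOf, cplB_eq]
            rw [if_neg]
            push Not
            exact ⟨by simpa using hdrop.1, hdrop.2⟩
          simp only [hcand]
          have hL : findA_go cur (p :: rest) (stOf acc).1 (stOf acc).2.1 (stOf acc).2.2
              = findA_go cur rest (stOf acc).1 (stOf acc).2.1 (stOf acc).2.2 := by
            cases acc with
            | none =>
              simp only [stOf, findA_go, if_neg hp, if_neg he, if_pos hdrop.1]
              rw [if_neg (by omega), if_neg (by omega)]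
            | some a =>
              obtain ⟨ca, nda, pa⟩ := a
              have h3 : 3 ≤ ca := (hacc _ rfl).2 hdrop.1
              simp only [stOf, findA_go, if_neg hp, if_neg he, if_pos hdrop.1]
              rw [if_neg (by omega), if_neg (by push Not; intro hq; omega)]
          rw [hL]; exact ih acc hacc
        · -- kept candidate
          set c := commonPrefixLen cur p with hcdef
          set ld : Int := |(cur.length : Int) - (p.length : Int)| with hlddef
          have hcand : candOf cur (decide (cur.length ≥ 5)) p = some (c, -ld, p) := by
            simp only [candOf, cplB_eq, ← hcdef, ← hlddef]
            rw [if_pos]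
            by_cases h5 : cur.length ≥ 5
            · right; omega
            · left; simp [h5]
          simp only [hcand]
          cases acc with
          | none =>
            have hL : findA_go cur (p :: rest) (stOf none).1 (stOf none).2.1 (stOf none).2.2
                = findA_go cur rest (stOf (some (c, -ld, p))).1 (stOf (some (c, -ld, p))).2.1 (stOf (some (c, -ld, p))).2.2 := by
              simp only [stOf, findA_go, if_neg hp, neg_neg]
              rw [← hcdef, ← hlddef, if_neg he]
              by_cases h5 : cur.length ≥ 5
              · have h3 : 3 ≤ c := by by_contra h; exact hdrop ⟨h5, by omega⟩
                rw [if_pos h5, if_pos ⟨h3, by omega⟩]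
              · rw [if_neg h5, if_pos (by omega)]
            rw [hL]
            simp only [foldOpt]
            refine ih (some (c, -ld, p)) ?_
            rintro t rfl'
            injection rfl' with h1; subst h1
            refine ⟨hc0, ?_⟩
            intro h5; by_contra hlt; exact hdrop ⟨h5, by omega⟩
          | some a =>
            obtain ⟨ca, nda, pa⟩ := a
            obtain ⟨hca0, hca3⟩ := hacc (ca, nda, pa) rfl
            simp only [foldOpt]
            by_cases hk : (c > ca ∨ (c = ca ∧ -ld > nda))
            · have hkb : keyGt (c, -ld, p) (ca, nda, pa) = true := by
                simp [keyGt]; omega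
              rw [if_pos hkb]
              have hL : findA_go cur (p :: rest) (some pa) ca (some (-nda))
                  = findA_go cur rest (some p) c (some ld) := by
                simp only [findA_go, if_neg hp]
                rw [← hcdef, ← hlddef, if_neg he]
                by_cases h5 : cur.length ≥ 5
                · have h3 : 3 ≤ c := by by_contra h; exact hdrop ⟨h5, by omega⟩
                  rw [if_pos h5]
                  rcases hk with hgt | ⟨heq, hdlt⟩
                  · rw [if_pos ⟨h3, hgt⟩]
                  · rw [if_neg (by omega), if_pos ⟨heq, by simp [ltInf]; omega⟩, heq]
                · rw [if_neg h5]
                  rcases hk with hgt | ⟨heq, hdlt⟩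
                  · rw [if_pos hgt]
                  · rw [if_neg (by omega), if_pos ⟨heq, by simp [ltInf]; omega⟩, heq]
              have hst : stOf (some (ca, nda, pa)) = (some pa, ca, some (-nda)) := rfl
              rw [hst] at *
              rw [show (((some pa : Option (List Int)), ca, (some (-nda) : Option Int)) : Option (List Int) × Int × Option Int).1 = some pa from rfl] at *
              calc findA_go cur (p :: rest) (some pa) ca (some (-nda))
                  = findA_go cur rest (some p) c (some ld) := hL
                _ = findA_go cur rest (stOf (some (c, -ld, p))).1 (stOf (some (c, -ld, p))).2.1 (stOf (some (c, -ld, p))).2.2 := by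
                    simp [stOf]
                _ = _ := by
                    refine ih (some (c, -ld, p)) ?_
                    rintro t ht; injection ht with h1; subst h1
                    refine ⟨hc0, fun h5 => ?_⟩
                    by_contra hlt; exact hdrop ⟨h5, by omega⟩
            · have hkb : keyGt (c, -ld, p) (ca, nda, pa) = false := by
                simp [keyGt]; omega
              rw [if_neg (by simp [hkb])]
              have hL : findA_go cur (p :: rest) (some pa) ca (some (-nda))
                  = findA_go cur rest (some pa) ca (some (-nda)) := by
                simp only [findA_go, if_neg hp]
                rw [← hcdef, ← hlddef, if_neg he]
                by_cases h5 : cur.length ≥ 5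
                · rw [if_pos h5, if_neg (by push Not; intro _; omega),
                      if_neg (by push Not; intro hq; simp [ltInf]; omega)]
                · rw [if_neg h5, if_neg (by omega),
                      if_neg (by push Not; intro hq; simp [ltInf]; omega)]
              have hst : stOf (some (ca, nda, pa)) = (some pa, ca, some (-nda)) := rfl
              rw [hst]
              calc findA_go cur (p :: rest) (some pa) ca (some (-nda))
                  = findA_go cur rest (some pa) ca (some (-nda)) := hL
                _ = _ := ih (some (ca, nda, pa)) hacc


-- ===== VERDICT (by name: the statement is the Claim_ definition above) =====
theorem find_most_relevant_sequence_spec : Claim_equal_find_most_relevant_sequence := by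
  intro cur prev _
  unfold Spec_find_most_relevant_sequence find_most_relevant_sequence find_most_relevant_sequence_alt
  by_cases hg : cur = [] ∨ prev = []
  · simp [hg]
  · simp only [hg, if_false]
    have h := go_eq cur prev.reverse none (by intro t ht; cases ht)
    simp only [stOf] at h
    rw [h]
    cases hf : (prev.reverse.filter (fun p => p ≠ [])).find? (earlyP cur) with
    | some p => simp
    | none =>
      cases hc : (prev.reverse.filter (fun p => p ≠ [])).filterMap (candOf cur (decide (cur.length ≥ 5))) with
      | nil => simp [foldOpt, finalize]
      | cons h' tl => simp [foldOpt, foldOpt_some, finalize, maxByFirst]
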